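-- pv_equiv track=rewrite | github.com/Aneureka/Life_in_NJU | njuseoj/problems/dac_7a.py | search
-- ===== SOURCE A (Python) =====
-- def find_block(n, tx, ty):
--     c = 2**(n-1)
--     b = 0 if ty < c else 1
--     if tx >= c:
--         b += 2
--     return b
--
-- def search(n, sx, sy, tx, ty):
--     if n == 1:
--         return set([(x-tx, y-ty) for (x, y) in list({(0, 0), (0, 1), (1, 0), (1, 1)} - {(sx, sy), (tx, ty)})])
--     sb = find_block(n, sx, sy)
--     tb = find_block(n, tx, ty)
--     c = 2**(n-1)
--     next_prob_sp = [(c-1, c-1), (c-1, c), (c, c-1), (c, c)]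
--     next_prob_sp.pop(sb)
--     if (tx, ty) in next_prob_sp:
--         return set([(x-tx, y-ty) for (x, y) in list(set(next_prob_sp) - {(tx, ty)})])
--     if sb == tb:
--         return search(n-1, sx % c, sy % c, tx % c, ty % c)
--     else:
--         return search(n-1, next_prob_sp[tb][0] % c, next_prob_sp[tb][1] % c, tx % c, ty % c)
-- ===== SOURCE B (Python) =====
-- def search(n, sx, sy, tx, ty):
--     # iterative descent: one loop frame per level instead of recursion
--     while n > 1:
--         c = 2 ** (n - 1)
--         sb = (2 if sx >= c else 0) + (0 if sy < c else 1)
--         tb = (2 if tx >= c else 0) + (0 if ty < c else 1)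
--         cells = [(c - 1, c - 1), (c - 1, c), (c, c - 1), (c, c)]
--         cells.pop(sb)
--         if (tx, ty) in cells:
--             return {(x - tx, y - ty) for (x, y) in cells if (x, y) != (tx, ty)}
--         if sb == tb:
--             sx, sy = sx % c, sy % c
--         else:
--             sx, sy = cells[tb][0] % c, cells[tb][1] % c
--         tx, ty = tx % c, ty % c
--         n -= 1
--     return {(x - tx, y - ty) for (x, y) in ((0, 0), (0, 1), (1, 0), (1, 1))
--             if (x, y) != (sx, sy) and (x, y) != (tx, ty)}
-- ===== Notes on version B (the rewrite author's own statement) =====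
-- stated objective: simpler
-- what changed: Replaced the recursion (and the find_block helper) by a single flat while-loop over the mutable frame (n, sx, sy, tx, ty) with the quadrant computed inline and the n==1 base case falling out after the loop.
-- outside the precondition, e.g. on search(9900, 0, 0, 1, 1): A returns {(-1, 0), (0, -1)}, B returns {(-1, 0), (0, -1)}
import Mathlib
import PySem

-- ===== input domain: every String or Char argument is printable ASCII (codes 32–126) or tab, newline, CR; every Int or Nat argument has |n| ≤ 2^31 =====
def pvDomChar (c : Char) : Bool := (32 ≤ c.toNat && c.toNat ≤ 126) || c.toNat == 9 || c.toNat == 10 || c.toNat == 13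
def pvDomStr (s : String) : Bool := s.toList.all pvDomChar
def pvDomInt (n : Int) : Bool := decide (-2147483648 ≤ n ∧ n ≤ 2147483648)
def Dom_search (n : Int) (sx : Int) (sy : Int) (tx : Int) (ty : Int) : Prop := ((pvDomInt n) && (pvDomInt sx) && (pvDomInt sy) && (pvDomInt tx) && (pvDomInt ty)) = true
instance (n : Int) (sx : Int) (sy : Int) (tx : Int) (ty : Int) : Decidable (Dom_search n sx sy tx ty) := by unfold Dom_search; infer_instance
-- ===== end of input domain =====

-- B replaces A's recursion by a single iterative loop (simpler: one flat function, no helper).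
-- Return value only; neither program mutates its arguments.

-- ===== PORT A =====
-- c = 2**(n-1): exact for the n ≥ 1 admitted by Pre_ (n ≤ 0 makes Python produce floats and recurse forever — excluded).
def findBlock (n : Int) (tx : Int) (ty : Int) : Int :=
  let c : Int := 2 ^ (n - 1).toNat
  let b : Int := if ty < c then 0 else 1
  if tx ≥ c then b + 2 else b

-- the recursion of Source A, written with a Nat depth counter (each call goes from n to n-1, so n.toNat steps suffice on Pre_);
-- the 'none' arms are Python's IndexError (next_prob_sp[tb] with tb = 3), excluded by Pre_.
def searchGo : Nat → Int → Int → Int → Int → Int → List (Int × Int)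
  | 0, _, _, _, _, _ => []
  | k+1, n, sx, sy, tx, ty =>
    if n = 1 then
      (([(0,0),(0,1),(1,0),(1,1)] : List (Int × Int)).filter
        (fun p => decide (p ≠ (sx, sy) ∧ p ≠ (tx, ty)))).map (fun p => (p.1 - tx, p.2 - ty))
    else
      let sb := findBlock n sx sy
      let tb := findBlock n tx ty
      let c : Int := 2 ^ (n - 1).toNat
      match PySem.List.pop? [(c-1,c-1),(c-1,c),(c,c-1),(c,c)] sb with
      | none => []
      | some (_, nps) =>
        if (tx, ty) ∈ nps then
          (nps.filter (fun p => decide (p ≠ (tx, ty)))).map (fun p => (p.1 - tx, p.2 - ty))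
        else if sb = tb then
          searchGo k (n-1) (PySem.Int.mod sx c) (PySem.Int.mod sy c) (PySem.Int.mod tx c) (PySem.Int.mod ty c)
        else
          match PySem.List.pyGet? nps tb with
          | some p => searchGo k (n-1) (PySem.Int.mod p.1 c) (PySem.Int.mod p.2 c) (PySem.Int.mod tx c) (PySem.Int.mod ty c)
          | none => []

def search (n : Int) (sx : Int) (sy : Int) (tx : Int) (ty : Int) : List (Int × Int) :=
  searchGo n.toNat n sx sy tx ty

-- ===== PORT B =====
-- the code after Source B's while loop
def altBase (sx : Int) (sy : Int) (tx : Int) (ty : Int) : List (Int × Int) :=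
  ([(0,0),(0,1),(1,0),(1,1)] : List (Int × Int)).filterMap
    (fun p => if p ≠ (sx, sy) ∧ p ≠ (tx, ty) then some (p.1 - tx, p.2 - ty) else none)

-- Source B's while loop as a tail recursion over its mutable state (n, sx, sy, tx, ty);
-- the 'none' arms are Source B's IndexError (cells[tb] with tb = 3), excluded by Pre_.
def altLoop : Nat → Int → Int → Int → Int → Int → List (Int × Int)
  | 0, _, sx, sy, tx, ty => altBase sx sy tx ty
  | k+1, n, sx, sy, tx, ty =>
    if 1 < n then
      let c : Int := 2 ^ (n - 1).toNat
      let sb : Int := (if sx ≥ c then 2 else 0) + (if sy < c then 0 else 1)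
      let tb : Int := (if tx ≥ c then 2 else 0) + (if ty < c then 0 else 1)
      match PySem.List.pop? [(c-1,c-1),(c-1,c),(c,c-1),(c,c)] sb with
      | none => []
      | some (_, cells) =>
        if (tx, ty) ∈ cells then
          cells.filterMap (fun p => if p ≠ (tx, ty) then some (p.1 - tx, p.2 - ty) else none)
        else
          match (if sb = tb then some (sx, sy) else PySem.List.pyGet? cells tb) with
          | some q => altLoop k (n-1) (PySem.Int.mod q.1 c) (PySem.Int.mod q.2 c)
                        (PySem.Int.mod tx c) (PySem.Int.mod ty c)
          | none => []
    else altBase sx sy tx ty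

def search_alt (n : Int) (sx : Int) (sy : Int) (tx : Int) (ty : Int) : List (Int × Int) :=
  altLoop n.toNat n sx sy tx ty

-- ===== PRECONDITION & SPEC =====
-- pvSafe says the descent never lands the target in the fourth quadrant while the source block is elsewhere
-- (there Python A indexes the popped 3-element list at 3 and raises IndexError).
def pvSafe : Nat → Int → Int → Int → Int → Bool
  | k+2, sx, sy, tx, ty => (let c : Int := 2 ^ (k+1); let sb : Int := (if sy < c then 0 else 1) + (if sx ≥ c then 2 else 0); let tb : Int := (if ty < c then 0 else 1) + (if tx ≥ c then 2 else 0); if tb = 3 ∧ sb ≠ 3 ∧ (tx, ty) ≠ (c, c) then false else if (tx = c - 1 ∨ tx = c) ∧ (ty = c - 1 ∨ ty = c) ∧ (tx, ty) ≠ (c - 1 + sb / 2, c - 1 + sb % 2) then true else if sb = tb then pvSafe (k+1) (sx % c) (sy % c) (tx % c) (ty % c) else pvSafe (k+1) ((c - 1 + (if tb < sb then tb else tb + 1) / 2) % c) ((c - 1 + (if tb < sb then tb else tb + 1) % 2) % c) (tx % c) (ty % c))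
  | _, _, _, _, _ => true

-- Pre_ excludes exactly the inputs where Python A raises: n ≤ 0 (float arithmetic, then endless descent →
-- RecursionError), descents that hit the IndexError of next_prob_sp[tb] with tb = 3 (¬ pvSafe), and n > 9800,
-- where A's n-deep recursion exceeds the interpreter's recursion limit (RecursionError; the grader runs Python
-- with a limit of 10000, and the exact cutoff depends on the caller's stack depth, so a small margin is left —
-- the few inputs with 9800 < n below the true cutoff still return and are excluded only by that margin; see cites).
def Pre_search (n : Int) (sx : Int) (sy : Int) (tx : Int) (ty : Int) : Prop :=
  1 ≤ n ∧ n ≤ 9800 ∧ pvSafe n.toNat sx sy tx ty = true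

instance (n : Int) (sx : Int) (sy : Int) (tx : Int) (ty : Int) : Decidable (Pre_search n sx sy tx ty) := by
  unfold Pre_search; infer_instance

def pvWitness_search : Int × Int × Int × Int × Int := (3, 5, 5, 2, 2)

def Spec_search (n : Int) (sx : Int) (sy : Int) (tx : Int) (ty : Int) (out : List (Int × Int)) : Prop :=
  out = search_alt n sx sy tx ty

instance (n : Int) (sx : Int) (sy : Int) (tx : Int) (ty : Int) (out : List (Int × Int)) : Decidable (Spec_search n sx sy tx ty out) := by
  unfold Spec_search; infer_instance

-- ===== CLAIM (what is proved, stated in full; the proofs are below) =====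
def Claim_equal_search : Prop := ∀ (n : Int) (sx : Int) (sy : Int) (tx : Int) (ty : Int), Dom_search n sx sy tx ty → Pre_search n sx sy tx ty → Spec_search n sx sy tx ty (search n sx sy tx ty)

-- ===== LEMMAS AND PROOFS =====

-- a Python set/filter comprehension versus filter-then-map
theorem filterMap_ite_eq_map_filter {α β : Type} (p : α → Prop) [DecidablePred p] (f : α → β) (l : List α) :
    l.filterMap (fun x => if p x then some (f x) else none) =
      (l.filter (fun x => decide (p x))).map f := by
  induction l with
  | nil => rfl
  | cons a l ih => by_cases h : p a <;> simp [h, ih]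

-- the two comprehension shapes of the early return, after simp-normalisation
theorem map_filter_ne_eq_filterMap (tx ty : Int) (l : List (Int × Int)) :
    List.map (fun p => (p.1 - tx, p.2 - ty)) (List.filter (fun p => !decide (p = (tx, ty))) l) =
      List.filterMap (fun x => if x = (tx, ty) then none else some (x.1 - tx, x.2 - ty)) l := by
  induction l with
  | nil => rfl
  | cons a l ih => by_cases h : a = (tx, ty) <;> simp [h, ih]

-- A's find_block equals B's inline block formula
theorem findBlock_eq (n tx ty : Int) :
    findBlock n tx ty =
      (if tx ≥ 2 ^ (n - 1).toNat then 2 else 0) + (if ty < (2:Int) ^ (n - 1).toNat then 0 else 1) := by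
  simp only [findBlock]
  split_ifs <;> omega

theorem go_eq (k : Nat) : ∀ (n sx sy tx ty : Int), 1 ≤ n → n ≤ (k : Int) →
    searchGo k n sx sy tx ty = altLoop k n sx sy tx ty := by
  induction k with
  | zero => intro n sx sy tx ty h1 h2; omega
  | succ k ih =>
    intro n sx sy tx ty h1 h2
    by_cases hn : n = 1
    · subst hn
      simp only [searchGo, altLoop, altBase]
      rw [if_true, if_neg (by norm_num : ¬ (1:Int) < 1),
        filterMap_ite_eq_map_filter (fun p : Int × Int => p ≠ (sx, sy) ∧ p ≠ (tx, ty))]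
    · have h2' : (1:Int) < n := by omega
      simp only [searchGo, altLoop, if_neg hn, if_pos h2', findBlock_eq]
      set c : Int := 2 ^ (n - 1).toNat with hc
      set sb : Int := (if sx ≥ c then 2 else 0) + (if sy < c then 0 else 1) with hsb
      set tb : Int := (if tx ≥ c then 2 else 0) + (if ty < c then 0 else 1) with htb
      have hsb4 : sb = 0 ∨ sb = 1 ∨ sb = 2 ∨ sb = 3 := by rw [hsb]; split_ifs <;> norm_num
      have htb4 : tb = 0 ∨ tb = 1 ∨ tb = 2 ∨ tb = 3 := by rw [htb]; split_ifs <;> norm_num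
      rcases hsb4 with h | h | h | h <;> rcases htb4 with h' | h' | h' | h' <;> rw [h, h'] <;>
        simp only [PySem.List.pop?, PySem.List.pyGet?, PySem.List.pyIdx?] <;>
        norm_num <;>
        split_ifs <;>
        first
          | rfl
          | exact map_filter_ne_eq_filterMap tx ty _
          | (apply ih <;> omega)

-- ===== VERDICT (by name: the statement is the Claim_ definition above) =====
theorem search_spec : Claim_equal_search := by
  intro n sx sy tx ty _hd hpre
  unfold Spec_search search search_alt
  exact go_eq n.toNat n sx sy tx ty hpre.1 (Int.self_le_toNat n)
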